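-- pv_equiv track=rewrite | github.com/nitishgupta/nmn-drop | datasets/drop/preprocess/numcomp/add_supervision.py | getQuestionComparisonOperator
-- ===== SOURCE A (Python) =====
-- from typing import List, Tuple, Dict, Union
--
-- GT_OPERATOR = "MORE"
--
-- LT_OPERATOR = "LESS"
--
-- greater_than_tokens = ["larger", "more", "largest", "bigger", "higher", "highest", "most", "greater"]
--
-- lesser_than_tokens = ["smaller", "fewer", "lowest", "smallest", "less", "least", "fewest", "lower"]
--
-- def getQuestionComparisonOperator(question_tokens: List[str]) -> str:
--     for t in lesser_than_tokens:
--         if t in question_tokens: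
--             return LT_OPERATOR
--
--     for t in greater_than_tokens:
--         if t in question_tokens:
--             return GT_OPERATOR
--
--     return None
-- ===== SOURCE B (Python) =====
-- from typing import List
--
-- GT_OPERATOR = "MORE"
-- LT_OPERATOR = "LESS"
--
-- greater_than_tokens = ["larger", "more", "largest", "bigger", "higher", "highest", "most", "greater"]
-- lesser_than_tokens = ["smaller", "fewer", "lowest", "smallest", "less", "least", "fewest", "lower"]
--
-- _lesser_set = frozenset(lesser_than_tokens)
-- _greater_set = frozenset(greater_than_tokens)
--
-- def getQuestionComparisonOperator(question_tokens: List[str]) -> str: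
--     saw_lesser = False
--     saw_greater = False
--     for tok in question_tokens:
--         if tok in _lesser_set:
--             saw_lesser = True
--         if tok in _greater_set:
--             saw_greater = True
--     if saw_lesser:
--         return LT_OPERATOR
--     if saw_greater:
--         return GT_OPERATOR
--     return None
-- ===== Notes on version B (the rewrite author's own statement) =====
-- stated objective: faster
-- what changed: Single flag-accumulating pass over the question tokens against two precomputed keyword sets, instead of two sequential short-circuit scans over the keyword lists each doing a linear membership test in the token list.
import Mathlib
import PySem

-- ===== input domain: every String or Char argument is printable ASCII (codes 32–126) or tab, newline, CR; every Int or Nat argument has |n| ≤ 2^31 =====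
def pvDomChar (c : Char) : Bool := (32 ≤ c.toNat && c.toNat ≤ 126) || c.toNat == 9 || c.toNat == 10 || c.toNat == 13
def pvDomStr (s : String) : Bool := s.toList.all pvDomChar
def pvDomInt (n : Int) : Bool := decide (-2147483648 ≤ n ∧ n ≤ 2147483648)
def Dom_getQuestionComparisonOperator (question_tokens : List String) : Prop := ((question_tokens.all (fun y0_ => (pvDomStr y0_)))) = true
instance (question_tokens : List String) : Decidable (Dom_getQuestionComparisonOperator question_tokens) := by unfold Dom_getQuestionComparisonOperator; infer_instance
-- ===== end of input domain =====

-- B replaces A's two sequential short-circuit scans over the keyword lists with one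
-- flag-accumulating pass over the question tokens (alternative decomposition, same result).


-- ===== PORT A =====
def pvGtOperator : String := "MORE"
def pvLtOperator : String := "LESS"
def pvGreaterTokens : List String :=
  ["larger", "more", "largest", "bigger", "higher", "highest", "most", "greater"]
def pvLesserTokens : List String :=
  ["smaller", "fewer", "lowest", "smallest", "less", "least", "fewest", "lower"]

-- A's 'for t in <keywords>: if t in question_tokens: return …' loop
def pvScanA (keywords question_tokens : List String) : Bool :=
  match keywords with
  | [] => false
  | t :: rest => if question_tokens.contains t then true else pvScanA rest question_tokens

def getQuestionComparisonOperator (question_tokens : List String) : Option String :=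
  if pvScanA pvLesserTokens question_tokens then some pvLtOperator
  else if pvScanA pvGreaterTokens question_tokens then some pvGtOperator
  else none

-- ===== PORT B =====
def pvLesserSet : PySem.Set String := PySem.Set.ofList pvLesserTokens
def pvGreaterSet : PySem.Set String := PySem.Set.ofList pvGreaterTokens

def getQuestionComparisonOperator_alt (question_tokens : List String) : Option String :=
  let flags := question_tokens.foldl
    (fun (p : Bool × Bool) tok =>
      (p.1 || PySem.Set.contains pvLesserSet tok, p.2 || PySem.Set.contains pvGreaterSet tok))
    (false, false)
  if flags.1 then some pvLtOperator
  else if flags.2 then some pvGtOperator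
  else none

-- ===== PRECONDITION & SPEC =====
def Spec_getQuestionComparisonOperator (question_tokens : List String) (out : Option String) : Prop := out = getQuestionComparisonOperator_alt question_tokens
instance (question_tokens : List String) (out : Option String) : Decidable (Spec_getQuestionComparisonOperator question_tokens out) := by unfold Spec_getQuestionComparisonOperator; infer_instance

-- ===== CLAIM (what is proved, stated in full; the proofs are below) =====
def Claim_equal_getQuestionComparisonOperator : Prop := ∀ (question_tokens : List String), Dom_getQuestionComparisonOperator question_tokens → Spec_getQuestionComparisonOperator question_tokens (getQuestionComparisonOperator question_tokens)

-- ===== LEMMAS AND PROOFS =====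

theorem pvScanA_eq_any (keywords question_tokens : List String) :
    pvScanA keywords question_tokens = keywords.any (fun t => question_tokens.contains t) := by
  induction keywords with
  | nil => rfl
  | cons t rest ih => simp [pvScanA, ih]

theorem pvFold_flags (question_tokens : List String) (a b : Bool) :
    question_tokens.foldl
      (fun (p : Bool × Bool) tok =>
        (p.1 || PySem.Set.contains pvLesserSet tok, p.2 || PySem.Set.contains pvGreaterSet tok))
      (a, b)
    = (a || question_tokens.any (fun tok => PySem.Set.contains pvLesserSet tok),
       b || question_tokens.any (fun tok => PySem.Set.contains pvGreaterSet tok)) := by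
  induction question_tokens generalizing a b with
  | nil => simp
  | cons tok rest ih => simp only [List.foldl, ih, List.any_cons, Bool.or_assoc]

theorem pvAny_swap (keywords question_tokens : List String) :
    keywords.any (fun t => question_tokens.contains t)
      = question_tokens.any (fun tok => keywords.contains tok) := by
  rw [Bool.eq_iff_iff]
  simp only [List.any_eq_true, List.contains_eq_mem, decide_eq_true_eq]
  exact ⟨fun ⟨t, ht, hq⟩ => ⟨t, hq, ht⟩, fun ⟨t, ht, hq⟩ => ⟨t, hq, ht⟩⟩

theorem pvSet_contains_ofList (l : List String) (tok : String) :
    PySem.Set.contains (PySem.Set.ofList l) tok = l.contains tok := by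
  rw [Bool.eq_iff_iff]
  simp [PySem.Set.contains, PySem.Set.mem_ofList]

-- ===== VERDICT (by name: the statement is the Claim_ definition above) =====
theorem getQuestionComparisonOperator_spec : Claim_equal_getQuestionComparisonOperator := by
  intro qts _
  unfold Spec_getQuestionComparisonOperator getQuestionComparisonOperator getQuestionComparisonOperator_alt
  rw [pvFold_flags]
  simp only [Bool.false_or, pvScanA_eq_any, pvAny_swap, pvLesserSet, pvGreaterSet,
    pvSet_contains_ofList]
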